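-- pv_equiv track=rewrite | github.com/princeton-nlp/rationale-robustness | rr/eval/utils.py | recover_to_pre_aug
-- ===== SOURCE A (Python) =====
-- def recover_to_pre_aug(sent_rationales, augs):
--     """
--     >>> sent_rationales = [0, 2, 3, 5, 8, 9, 10, 13, 18]  # augmented sequence
--     >>> augs = [7, 12, 20]
--     >>> recover_to_pre_aug(sent_rationales, augs)
--     [0, 2, 3, 5, 7, 8, 9, 11, 16]
--     """
--     augs = sorted(augs, reverse=True)
--     recovered_sent_rationales = []
--     for aug in augs:
--         for rationale in sent_rationales:
--             if rationale < aug: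
--                 recovered_sent_rationales.append(rationale)
--             elif rationale > aug:
--                 recovered_sent_rationales.append(rationale - 1)
--             else:
--                 # this could happen when the `sent_rationales` is predicted instead of gold
--                 continue
--         sent_rationales, recovered_sent_rationales = recovered_sent_rationales, []
--     return sent_rationales
-- ===== SOURCE B (Python) =====
-- # B: instead of re-scanning and rebuilding the whole rationale list once per aug
-- # (A's k passes), compute once the sorted set of "removed original positions" the
-- # descending aug passes delete, then answer each rationale with one binary search:
-- # drop it if it is a removed position, else subtract its rank among removed ones.
--
-- def bisect_left(a, x):
--     # stdlib bisect.bisect_left, written out (A imports no modules)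
--     lo, hi = 0, len(a)
--     while lo < hi:
--         mid = (lo + hi) // 2
--         if a[mid] < x:
--             lo = mid + 1
--         else:
--             hi = mid
--     return lo
--
-- def recover_to_pre_aug(sent_rationales, augs):
--     removed = []  # sorted ascending, distinct: original positions deleted by the aug passes
--     for a in sorted(augs, reverse=True):
--         pos = bisect_left(removed, a)
--         o = a
--         while pos < len(removed) and removed[pos] <= o:
--             o += 1
--             pos += 1
--         removed.insert(pos, o)
--     out = []
--     for r in sent_rationales:
--         i = bisect_left(removed, r)
--         if i < len(removed) and removed[i] == r:
--             continue
--         out.append(r - i)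
--     return out
-- ===== Notes on version B (the rewrite author's own statement) =====
-- stated objective: faster
-- what changed: Instead of rebuilding the whole rationale list once per aug (A's k full passes), B precomputes once the sorted list of original positions the descending aug passes delete, then answers each rationale independently with one binary search (drop if removed, else subtract its rank among removed positions).
import Mathlib
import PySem

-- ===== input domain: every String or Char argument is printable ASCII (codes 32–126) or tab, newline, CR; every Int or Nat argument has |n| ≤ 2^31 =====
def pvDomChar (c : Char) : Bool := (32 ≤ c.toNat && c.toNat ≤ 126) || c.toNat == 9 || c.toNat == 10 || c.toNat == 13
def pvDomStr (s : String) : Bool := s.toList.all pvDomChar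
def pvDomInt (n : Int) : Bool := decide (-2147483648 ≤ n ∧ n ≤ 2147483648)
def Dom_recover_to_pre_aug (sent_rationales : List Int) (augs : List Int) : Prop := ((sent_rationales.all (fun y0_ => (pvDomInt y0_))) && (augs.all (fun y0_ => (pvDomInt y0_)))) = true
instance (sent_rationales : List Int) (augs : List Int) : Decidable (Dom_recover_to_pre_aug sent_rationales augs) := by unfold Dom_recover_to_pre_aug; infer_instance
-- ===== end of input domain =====

-- B replaces A's per-aug rescan of the whole rationale list by one precomputed sorted list of
-- removed original positions plus a binary search per rationale (objective: faster).

-- ===== PORT A =====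
-- literal port: sort augs descending, then one full pass over the current rationale
-- list per aug, rebuilding it by appending.
def recover_to_pre_aug (sent_rationales : List Int) (augs : List Int) : List Int :=
  let augsS := PySem.List.sorted augs (fun x => x) true
  augsS.foldl
    (fun sr aug =>
      sr.foldl (fun rec r =>
        if r < aug then rec ++ [r]
        else if r > aug then rec ++ [r - 1]
        else rec) [])
    sent_rationales

-- ===== PORT B =====
-- Source B's hand-written bisect_left is verbatim the stdlib lo/hi binary-search loop,
-- ported as PySem.List.bisectLeft (the same loop).

-- the inner `while pos < len(removed) and removed[pos] <= o: o += 1; pos += 1`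
def pvPlace (removed : List Int) (pos : Nat) (o : Int) : Nat × Int :=
  if h : pos < removed.length then
    if removed[pos] ≤ o then pvPlace removed (pos + 1) (o + 1)
    else (pos, o)
  else (pos, o)
termination_by removed.length - pos

-- one iteration of B's first loop: locate a, slide past the occupied block, insert
def pvInsertAug (removed : List Int) (a : Int) : List Int :=
  let pos := PySem.List.bisectLeft removed a
  let po := pvPlace removed pos a
  PySem.List.insert removed (po.1 : Int) po.2

-- body of B's second loop: none = `continue`, some v = `out.append(v)`
def pvLookup (removed : List Int) (r : Int) : Option Int :=
  let i := PySem.List.bisectLeft removed r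
  if h : i < removed.length then
    if removed[i] = r then none else some (r - (i : Int))
  else some (r - (i : Int))

def recover_to_pre_aug_alt (sent_rationales : List Int) (augs : List Int) : List Int :=
  let removed := (PySem.List.sorted augs (fun x => x) true).foldl pvInsertAug []
  sent_rationales.foldl (fun out r =>
    match pvLookup removed r with
    | none => out
    | some v => out ++ [v]) []

-- ===== PRECONDITION & SPEC =====
def Spec_recover_to_pre_aug (sent_rationales : List Int) (augs : List Int) (out : List Int) : Prop := out = recover_to_pre_aug_alt sent_rationales augs
instance (sent_rationales : List Int) (augs : List Int) (out : List Int) : Decidable (Spec_recover_to_pre_aug sent_rationales augs out) := by unfold Spec_recover_to_pre_aug; infer_instance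

-- ===== CLAIM (what is proved, stated in full; the proofs are below) =====
def Claim_equal_recover_to_pre_aug : Prop := ∀ (sent_rationales : List Int) (augs : List Int), Dom_recover_to_pre_aug sent_rationales augs → Spec_recover_to_pre_aug sent_rationales augs (recover_to_pre_aug sent_rationales augs)

-- ===== LEMMAS AND PROOFS =====

def stepA (a r : Int) : Option Int :=
  if r < a then some r else if r > a then some (r - 1) else none

def mapR : List Int → Int → Option Int
  | [], r => some r
  | x :: xs, r => if r < x then some r else if r = x then none else (mapR xs r).map (· - 1)

def pvIns (R : List Int) (a : Int) : List Int :=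
  R.take (pvPlace R 0 a).1 ++ (pvPlace R 0 a).2 :: R.drop (pvPlace R 0 a).1

theorem pvPlace_shift (x : Int) (xs : List Int) (p : Nat) (o : Int) :
    pvPlace (x :: xs) (p + 1) o = ((pvPlace xs p o).1 + 1, (pvPlace xs p o).2) := by
  fun_induction pvPlace xs p o with
  | case1 p o h hle ih =>
      rw [pvPlace]; simp only [List.length_cons, List.getElem_cons_succ]
      rw [dif_pos (by omega), if_pos hle, ih]
  | case2 p o h hle =>
      rw [pvPlace]; simp only [List.length_cons, List.getElem_cons_succ]
      rw [dif_pos (by omega), if_neg hle]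
  | case3 p o h => rw [pvPlace, dif_neg (by simp; omega)]

theorem pvPlace_fst_le (R : List Int) (p : Nat) (o : Int) (h : p ≤ R.length) :
    (pvPlace R p o).1 ≤ R.length := by
  fun_induction pvPlace R p o with
  | case1 p o h hle ih => exact ih (by omega)
  | case2 p o h hle => simp; omega
  | case3 p o h => simp; omega

theorem pvPlace_le_snd (R : List Int) (p : Nat) (o : Int) : o ≤ (pvPlace R p o).2 := by
  fun_induction pvPlace R p o with
  | case1 p o h hle ih => omega
  | case2 => simp
  | case3 => simp

theorem bisectLeft_zero (R : List Int) (a : Int)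
    (hs : R.Pairwise (· ≤ ·)) (hb : ∀ y ∈ R, a ≤ y) :
    PySem.List.bisectLeft R a = 0 := by
  obtain ⟨hlen, hlt, _⟩ := PySem.List.bisectLeft_spec R a hs
  by_contra h
  have h0 : 0 < R.length := by omega
  have := hlt 0 h0 (by omega)
  have := hb R[0] (R.getElem_mem h0)
  omega

theorem pvInsertAug_eq_pvIns (R : List Int) (a : Int)
    (hs : R.Pairwise (· < ·)) (hb : ∀ y ∈ R, a ≤ y) :
    pvInsertAug R a = pvIns R a := by
  unfold pvInsertAug pvIns
  rw [bisectLeft_zero R a (hs.imp (fun h => le_of_lt h)) hb]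
  rw [PySem.List.insert_natCast _ _ _ (pvPlace_fst_le R 0 a (by omega))]

theorem pvIns_nil (a : Int) : pvIns [] a = [a] := by
  simp [pvIns, pvPlace]

theorem pvIns_cons_self (a : Int) (xs : List Int) :
    pvIns (a :: xs) a = a :: pvIns xs (a + 1) := by
  unfold pvIns
  rw [show pvPlace (a :: xs) 0 a = ((pvPlace xs 0 (a+1)).1 + 1, (pvPlace xs 0 (a+1)).2) by
    rw [pvPlace]; simp [pvPlace_shift]]
  simp

theorem pvIns_cons_gt (a x : Int) (xs : List Int) (h : a < x) :
    pvIns (x :: xs) a = a :: x :: xs := by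
  unfold pvIns
  rw [show pvPlace (x :: xs) 0 a = (0, a) by rw [pvPlace]; simp; omega]
  simp

theorem mem_pvIns (R : List Int) (a y : Int) :
    y ∈ pvIns R a ↔ y ∈ R ∨ y = (pvPlace R 0 a).2 := by
  unfold pvIns
  constructor
  · intro h
    rcases List.mem_append.mp h with h | h
    · exact Or.inl (List.mem_of_mem_take h)
    · rcases List.mem_cons.mp h with h | h
      · exact Or.inr h
      · exact Or.inl (List.mem_of_mem_drop h)
  · intro h
    rcases h with h | h
    · rw [← List.take_append_drop (pvPlace R 0 a).1 R] at h
      rcases List.mem_append.mp h with h | h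
      · exact List.mem_append.mpr (Or.inl h)
      · exact List.mem_append.mpr (Or.inr (List.mem_cons_of_mem _ h))
    · exact List.mem_append.mpr (Or.inr (List.mem_cons.mpr (Or.inl h)))

theorem mapR_lb (R : List Int) (b r w : Int)
    (hs : R.Pairwise (· < ·)) (hb : ∀ y ∈ R, b < y) (hr : b < r)
    (hw : mapR R r = some w) : b < w := by
  induction R generalizing b r w with
  | nil => simp [mapR] at hw; omega
  | cons x xs ih =>
      rw [mapR] at hw
      split_ifs at hw with h1 h2
      · simp only [Option.some.injEq] at hw; omega
      · simp only [Option.map_eq_some_iff] at hw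
        obtain ⟨w', hw', rfl⟩ := hw
        have hx : b < x := hb x (by simp)
        have : x < w' := ih x r w' (List.Pairwise.of_cons hs)
          (fun y hy => (List.pairwise_cons.mp hs).1 y hy) (by omega) hw'
        omega

theorem mapR_step (R : List Int) (a : Int)
    (hs : R.Pairwise (· < ·)) (hb : ∀ y ∈ R, a ≤ y) (r : Int) :
    (mapR R r).bind (stepA a) = mapR (pvIns R a) r := by
  induction R generalizing a with
  | nil =>
      rw [pvIns_nil]
      simp only [mapR, Option.bind_some, stepA]
      split_ifs with h1 h2 <;> simp_all <;> omega
  | cons x xs ih =>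
      by_cases hax : a < x
      · rw [pvIns_cons_gt a x xs hax]
        rcases lt_trichotomy r a with h | h | h
        · rw [show mapR (x :: xs) r = some r by rw [mapR, if_pos (by omega)]]
          rw [show mapR (a :: x :: xs) r = some r by rw [mapR, if_pos (by omega)]]
          simp [stepA, h]
        · subst h
          rw [show mapR (x :: xs) r = some r by rw [mapR, if_pos (by omega)]]
          rw [show mapR (r :: x :: xs) r = none by rw [mapR]; simp]
          simp [stepA]
        · rw [show mapR (a :: x :: xs) r = (mapR (x :: xs) r).map (· - 1) by
            rw [mapR, if_neg (by omega), if_neg (by omega)]]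
          cases hm : mapR (x :: xs) r with
          | none => simp
          | some w =>
              have hw : a < w := mapR_lb (x :: xs) a r w hs
                (by intro y hy; rcases List.mem_cons.mp hy with rfl | hy
                    · omega
                    · exact lt_of_lt_of_le hax (le_of_lt ((List.pairwise_cons.mp hs).1 y hy)))
                h hm
              simp [stepA, if_neg (by omega : ¬ w < a), if_pos (by omega : w > a)]
      · have hxa : x = a := le_antisymm (by omega) (hb x (by simp))
        subst hxa
        rw [pvIns_cons_self x xs]
        have ihx := ih (x + 1) (List.Pairwise.of_cons hs)
          (fun y hy => by have := (List.pairwise_cons.mp hs).1 y hy; omega)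
        rcases lt_trichotomy r x with h | h | h
        · rw [show mapR (x :: xs) r = some r by rw [mapR, if_pos h]]
          rw [show mapR (x :: pvIns xs (x+1)) r = some r by rw [mapR, if_pos h]]
          simp [stepA, h]
        · subst h
          rw [show mapR (r :: xs) r = none by rw [mapR]; simp]
          rw [show mapR (r :: pvIns xs (r+1)) r = none by rw [mapR]; simp]
          simp
        · rw [show mapR (x :: xs) r = (mapR xs r).map (· - 1) by
            rw [mapR, if_neg (by omega), if_neg (by omega)]]
          rw [show mapR (x :: pvIns xs (x+1)) r = (mapR (pvIns xs (x+1)) r).map (· - 1) by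
            rw [mapR, if_neg (by omega), if_neg (by omega)]]
          rw [← ihx]
          cases hm : mapR xs r with
          | none => simp
          | some w =>
              simp only [Option.map_some, Option.bind_some, stepA]
              split_ifs <;> simp <;> omega

theorem pvIns_sorted (R : List Int) (a : Int)
    (hs : R.Pairwise (· < ·)) (hb : ∀ y ∈ R, a ≤ y) :
    (pvIns R a).Pairwise (· < ·) := by
  induction R generalizing a with
  | nil => rw [pvIns_nil]; simp
  | cons x xs ih =>
      by_cases hax : a < x
      · rw [pvIns_cons_gt a x xs hax]
        exact List.pairwise_cons.mpr ⟨by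
          intro y hy
          rcases List.mem_cons.mp hy with rfl | hy
          · exact hax
          · exact lt_trans hax ((List.pairwise_cons.mp hs).1 y hy), hs⟩
      · have hxa : x = a := le_antisymm (by omega) (hb x (by simp))
        subst hxa
        rw [pvIns_cons_self x xs]
        refine List.pairwise_cons.mpr ⟨?_, ih (x+1) (List.Pairwise.of_cons hs)
          (fun y hy => by have := (List.pairwise_cons.mp hs).1 y hy; omega)⟩
        intro y hy
        rcases (mem_pvIns xs (x+1) y).mp hy with hy | rfl
        · exact (List.pairwise_cons.mp hs).1 y hy
        · have := pvPlace_le_snd xs 0 (x+1); omega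

theorem buildR_sorted (d : List Int) (R : List Int)
    (hd : d.Pairwise (fun a b => b ≤ a))
    (hs : R.Pairwise (· < ·)) (hb : ∀ y ∈ R, ∀ a ∈ d, a ≤ y) :
    (d.foldl pvInsertAug R).Pairwise (· < ·) := by
  induction d generalizing R with
  | nil => exact hs
  | cons a d' ih =>
      have hba : ∀ y ∈ R, a ≤ y := fun y hy => hb y hy a (by simp)
      rw [List.foldl_cons, pvInsertAug_eq_pvIns R a hs hba]
      refine ih (pvIns R a) (List.Pairwise.of_cons hd) (pvIns_sorted R a hs hba) ?_
      intro y hy a' ha'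
      rcases (mem_pvIns R a y).mp hy with hy | rfl
      · exact hb y hy a' (by simp [ha'])
      · have h1 := pvPlace_le_snd R 0 a
        have h2 := (List.pairwise_cons.mp hd).1 a' ha'
        omega

theorem buildR_mapR (d : List Int) (R : List Int)
    (hd : d.Pairwise (fun a b => b ≤ a))
    (hs : R.Pairwise (· < ·)) (hb : ∀ y ∈ R, ∀ a ∈ d, a ≤ y) (r : Int) :
    d.foldl (fun o a => o.bind (stepA a)) (mapR R r) = mapR (d.foldl pvInsertAug R) r := by
  induction d generalizing R with
  | nil => rfl
  | cons a d' ih =>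
      have hba : ∀ y ∈ R, a ≤ y := fun y hy => hb y hy a (by simp)
      rw [List.foldl_cons, List.foldl_cons, pvInsertAug_eq_pvIns R a hs hba,
        mapR_step R a hs hba r]
      refine ih (pvIns R a) (List.Pairwise.of_cons hd) (pvIns_sorted R a hs hba) ?_
      intro y hy a' ha'
      rcases (mem_pvIns R a y).mp hy with hy | rfl
      · exact hb y hy a' (by simp [ha'])
      · have h1 := pvPlace_le_snd R 0 a
        have h2 := (List.pairwise_cons.mp hd).1 a' ha'
        omega

theorem foldlA_eq_filterMap (a : Int) (cur acc : List Int) :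
    cur.foldl (fun rec r =>
        if r < a then rec ++ [r]
        else if r > a then rec ++ [r - 1]
        else rec) acc = acc ++ cur.filterMap (stepA a) := by
  induction cur generalizing acc with
  | nil => simp
  | cons r cur ih =>
      rw [List.foldl_cons, ih]
      by_cases h1 : r < a
      · simp [stepA, h1]
      · by_cases h2 : r > a <;> simp [stepA, h1, h2]

theorem foldl_bind_init (d : List Int) (o : Option Int) :
    d.foldl (fun o a => o.bind (stepA a)) o
      = o.bind (fun r => d.foldl (fun o a => o.bind (stepA a)) (some r)) := by
  cases o with
  | some r => simp
  | none =>
      simp only [Option.bind_none]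
      induction d with
      | nil => rfl
      | cons a d ih => rw [List.foldl_cons]; simpa using ih

theorem foldl_filterMap_comp (d L : List Int) :
    d.foldl (fun l a => l.filterMap (stepA a)) L
      = L.filterMap (fun r => d.foldl (fun o a => o.bind (stepA a)) (some r)) := by
  induction d generalizing L with
  | nil => simp
  | cons a d ih =>
      rw [List.foldl_cons, ih, List.filterMap_filterMap]
      apply List.filterMap_congr
      intro r _
      rw [List.foldl_cons]
      simp only [Option.bind_some]
      exact (foldl_bind_init d (stepA a r)).symm

theorem mapR_closed (R : List Int) (r : Int) (hs : R.Pairwise (· < ·)) :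
    mapR R r = if r ∈ R then none else some (r - (R.countP (fun x => decide (x < r)) : Int)) := by
  induction R with
  | nil => simp [mapR]
  | cons x xs ih =>
      rw [mapR]
      rcases lt_trichotomy r x with h | h | h
      · rw [if_pos h, if_neg]
        · have hc : ∀ y ∈ x :: xs, ¬ (y < r) := by
            intro y hy
            rcases List.mem_cons.mp hy with rfl | hy
            · omega
            · have := (List.pairwise_cons.mp hs).1 y hy; omega
          rw [List.countP_eq_zero.mpr (by intro y hy; simpa using hc y hy)]
          simp
        · intro hmem
          rcases List.mem_cons.mp hmem with rfl | hmem
          · omega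
          · have := (List.pairwise_cons.mp hs).1 r hmem; omega
      · subst h; simp
      · rw [if_neg (by omega), if_neg (by omega), ih (List.Pairwise.of_cons hs)]
        by_cases hmem : r ∈ xs
        · simp [hmem]
        · rw [if_neg hmem, if_neg (by simp [hmem]; omega)]
          rw [List.countP_cons, if_pos (by simpa using h)]
          simp; ring

theorem countP_lt_eq (R : List Int) (r : Int) (i : Nat) (hi : i ≤ R.length)
    (h1 : ∀ j, (hj : j < R.length) → j < i → R[j] < r)
    (h2 : ∀ j, (hj : j < R.length) → i ≤ j → ¬ R[j] < r) :
    R.countP (fun x => decide (x < r)) = i := by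
  conv_lhs => rw [← List.take_append_drop i R]
  rw [List.countP_append]
  have ht : (R.take i).countP (fun x => decide (x < r)) = i := by
    rw [List.countP_eq_length.mpr, List.length_take]
    · omega
    · intro x hx
      obtain ⟨j, hj, rfl⟩ := List.mem_iff_getElem.mp hx
      rw [List.getElem_take]
      simp only [decide_eq_true_eq]
      exact h1 j (by simp at hj; omega) (by simp at hj; omega)
  have hd : (R.drop i).countP (fun x => decide (x < r)) = 0 := by
    rw [List.countP_eq_zero]
    intro x hx
    obtain ⟨j, hj, rfl⟩ := List.mem_iff_getElem.mp hx
    rw [List.getElem_drop]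
    simp only [decide_eq_true_eq]
    exact h2 (i + j) (by simp at hj; omega) (by omega)
  omega

theorem pvLookup_eq_mapR (R : List Int) (r : Int) (hs : R.Pairwise (· < ·)) :
    pvLookup R r = mapR R r := by
  have hle : R.Pairwise (· ≤ ·) := hs.imp (fun h => le_of_lt h)
  obtain ⟨hlen, hlt, hge⟩ := PySem.List.bisectLeft_spec R r hle
  rw [mapR_closed R r hs]
  unfold pvLookup
  set i := PySem.List.bisectLeft R r with hi
  by_cases h : i < R.length
  · rw [dif_pos h]
    by_cases heq : R[i] = r
    · rw [if_pos heq, if_pos (heq ▸ R.getElem_mem h)]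
    · rw [if_neg heq, if_neg ?_, countP_lt_eq R r i hlen hlt
        (fun j hj hij => by have := hge j hj hij; omega)]
      intro hmem
      obtain ⟨j, hj, hjr⟩ := List.mem_iff_getElem.mp hmem
      rcases lt_trichotomy j i with hji | hji | hji
      · have := hlt j hj hji; omega
      · exact heq (hji ▸ hjr)
      · have h3 := hge i h (le_refl i)
        have h4 : R[i] < R[j] := List.pairwise_iff_getElem.mp hs i j h hj hji
        omega
  · rw [dif_neg h]
    have hil : i = R.length := by omega
    rw [if_neg ?_, countP_lt_eq R r i hlen hlt (fun j hj hij => by omega)]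
    intro hmem
    obtain ⟨j, hj, hjr⟩ := List.mem_iff_getElem.mp hmem
    have := hlt j hj (by omega)
    omega

theorem foldlB_eq_filterMap (R : List Int) (s acc : List Int) :
    s.foldl (fun out r =>
      match pvLookup R r with
      | none => out
      | some v => out ++ [v]) acc = acc ++ s.filterMap (pvLookup R) := by
  induction s generalizing acc with
  | nil => simp
  | cons r s ih =>
      rw [List.foldl_cons, ih]
      cases h : pvLookup R r <;> simp [h]

theorem ports_eq (s augs : List Int) :
    (let augsS := PySem.List.sorted augs (fun x => x) true
     augsS.foldl
       (fun sr aug =>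
         sr.foldl (fun rec r =>
           if r < aug then rec ++ [r]
           else if r > aug then rec ++ [r - 1]
           else rec) [])
       s)
    = (let removed := (PySem.List.sorted augs (fun x => x) true).foldl pvInsertAug []
       s.foldl (fun out r =>
         match pvLookup removed r with
         | none => out
         | some v => out ++ [v]) []) := by
  set d := PySem.List.sorted augs (fun x => x) true with hdd
  have hd : d.Pairwise (fun a b => b ≤ a) := PySem.List.sorted_pairwise_rev augs (fun x => x)
  set Rm := d.foldl pvInsertAug [] with hRm
  have hRs : Rm.Pairwise (· < ·) := buildR_sorted d [] hd (by simp) (by simp)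
  simp only
  rw [foldlB_eq_filterMap Rm s [], List.nil_append]
  have hpass : (fun (sr : List Int) (aug : Int) =>
      sr.foldl (fun rec r =>
        if r < aug then rec ++ [r]
        else if r > aug then rec ++ [r - 1]
        else rec) []) = fun sr aug => sr.filterMap (stepA aug) := by
    funext sr aug
    rw [foldlA_eq_filterMap aug sr [], List.nil_append]
  rw [hpass, foldl_filterMap_comp d s]
  apply List.filterMap_congr
  intro r _
  rw [show (some r) = mapR [] r from rfl, buildR_mapR d [] hd (by simp) (by simp) r,
    ← hRm, pvLookup_eq_mapR Rm r hRs]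

-- ===== VERDICT (by name: the statement is the Claim_ definition above) =====
theorem recover_to_pre_aug_spec : Claim_equal_recover_to_pre_aug := by
  intro sent_rationales augs _
  unfold Spec_recover_to_pre_aug recover_to_pre_aug recover_to_pre_aug_alt
  exact ports_eq sent_rationales augs
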